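-- pv_equiv track=rewrite | github.com/emilyvus/cp_als | populations/mylib.py | find_matching_columns
-- ===== SOURCE A (Python) =====
-- def find_matching_columns(row, value_to_match):
--     matching_cols = []
--     for col_name, col_value in row.items():
--         for v in value_to_match:
--             if col_value ==v:
--                 matching_cols.append(col_name)
--
--     matching_cols.sort()
--     return",".join(matching_cols)
-- ===== SOURCE B (Python) =====
-- def find_matching_columns(row, value_to_match):
--     index = {}
--     for col_name, col_value in row.items():
--         index.setdefault(col_value, []).append(col_name)
--     matching_cols = []
--     for v in value_to_match:
--         matching_cols.extend(index.get(v, []))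
--     matching_cols.sort()
--     return ",".join(matching_cols)
-- ===== Notes on version B (the rewrite author's own statement) =====
-- stated objective: faster
-- what changed: Builds an inverted index (value -> list of column names) in one pass over the row, then iterates over value_to_match doing O(1) dict lookups instead of A's inner scan of value_to_match for every column; the final sort makes the different build order irrelevant.
import Mathlib
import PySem

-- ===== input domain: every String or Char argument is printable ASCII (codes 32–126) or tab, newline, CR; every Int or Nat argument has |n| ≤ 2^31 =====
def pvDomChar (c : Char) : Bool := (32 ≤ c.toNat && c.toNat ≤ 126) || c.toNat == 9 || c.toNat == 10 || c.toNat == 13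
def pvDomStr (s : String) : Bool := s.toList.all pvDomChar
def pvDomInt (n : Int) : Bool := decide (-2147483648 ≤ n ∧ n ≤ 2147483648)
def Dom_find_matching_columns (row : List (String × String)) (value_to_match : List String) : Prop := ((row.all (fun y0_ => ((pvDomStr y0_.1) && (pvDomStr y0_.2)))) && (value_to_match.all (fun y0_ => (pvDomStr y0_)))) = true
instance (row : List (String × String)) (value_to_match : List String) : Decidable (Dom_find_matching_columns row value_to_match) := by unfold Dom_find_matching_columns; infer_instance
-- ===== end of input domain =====

-- B builds an inverted index (value -> column names) once and looks each match value up,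
-- instead of A's nested scan; the trailing sort makes the build order irrelevant. (objective: alternative)

-- ===== PORT A =====
-- for col_name, col_value in row.items(): for v in value_to_match: if col_value == v: append col_name
def find_matching_columns (row : List (String × String)) (value_to_match : List String) : String :=
  let matching_cols : List String :=
    row.foldl (fun acc p =>
      value_to_match.foldl (fun acc2 v => if p.2 = v then acc2 ++ [p.1] else acc2) acc) []
  PySem.Str.join "," (PySem.List.sorted matching_cols (fun x => x) false)

-- ===== PORT B =====
-- index.setdefault(col_value, []).append(col_name)  ==  index[col_value] = index.get(col_value, []) + [col_name]
def find_matching_columns_alt (row : List (String × String)) (value_to_match : List String) : String :=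
  let index : PySem.Dict String (List String) :=
    row.foldl (fun d p => d.modify p.2 [] (· ++ [p.1])) PySem.Dict.empty
  let matching_cols : List String :=
    value_to_match.foldl (fun acc v => acc ++ index.getD v []) []
  PySem.Str.join "," (PySem.List.sorted matching_cols (fun x => x) false)

-- ===== PRECONDITION & SPEC =====
def Spec_find_matching_columns (row : List (String × String)) (value_to_match : List String) (out : String) : Prop := out = find_matching_columns_alt row value_to_match
instance (row : List (String × String)) (value_to_match : List String) (out : String) : Decidable (Spec_find_matching_columns row value_to_match out) := by unfold Spec_find_matching_columns; infer_instance

-- ===== CLAIM (what is proved, stated in full; the proofs are below) =====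
def Claim_equal_find_matching_columns : Prop := ∀ (row : List (String × String)) (value_to_match : List String), Dom_find_matching_columns row value_to_match → Spec_find_matching_columns row value_to_match (find_matching_columns row value_to_match)

-- ===== LEMMAS AND PROOFS =====

-- A's inner loop over value_to_match, written as a flatMap
theorem fmc_inner_loop (p : String × String) (vtm : List String) (acc : List String) :
    vtm.foldl (fun acc2 v => if p.2 = v then acc2 ++ [p.1] else acc2) acc
      = acc ++ vtm.flatMap (fun v => if p.2 = v then [p.1] else []) := by
  induction vtm generalizing acc with
  | nil => simp
  | cons v t ih =>
    by_cases h : p.2 = v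
    · subst h; simp [ih]
    · simp [h, ih]

-- A's outer loop, written as a double flatMap
theorem fmc_a_list (row : List (String × String)) (vtm : List String) (acc : List String) :
    row.foldl (fun acc p =>
        vtm.foldl (fun acc2 v => if p.2 = v then acc2 ++ [p.1] else acc2) acc) acc
      = acc ++ row.flatMap (fun p => vtm.flatMap (fun v => if p.2 = v then [p.1] else [])) := by
  induction row generalizing acc with
  | nil => simp
  | cons p t ih => simp [List.foldl_cons, fmc_inner_loop, List.flatMap]

-- the grouped rows with value v, read back from the swapped pairs
theorem fmc_filter_swap (row : List (String × String)) (v : String) :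
    ((row.map (fun p => (p.2, p.1))).filter (fun q => q.1 == v)).map (fun q => q.2)
      = row.flatMap (fun p => if p.2 = v then [p.1] else []) := by
  induction row with
  | nil => simp
  | cons p t ih => by_cases hp : p.2 = v <;> simp [hp, ih]

-- B's index lookup: the column names of the row entries whose value is v
theorem fmc_index_getD (row : List (String × String)) (v : String) :
    ((row.foldl (fun d p => d.modify p.2 [] (· ++ [p.1])) PySem.Dict.empty).getD v [])
      = row.flatMap (fun p => if p.2 = v then [p.1] else []) := by
  have h : row.foldl (fun d p => d.modify p.2 [] (· ++ [p.1])) PySem.Dict.empty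
      = (row.map (fun p => (p.2, p.1))).foldl (fun d q => d.modify q.1 [] (· ++ [q.2])) PySem.Dict.empty := by
    rw [List.foldl_map]
  rw [h, PySem.Dict.getD_foldl_modify_append, ← fmc_filter_swap row v]
  simp [PySem.Dict.getD, PySem.Dict.get?, PySem.Dict.empty]

-- B's collection loop, written as a flatMap
theorem fmc_b_list (vtm : List String) (g : String → List String) (acc : List String) :
    vtm.foldl (fun acc v => acc ++ g v) acc = acc ++ vtm.flatMap g := by
  induction vtm generalizing acc with
  | nil => simp
  | cons v t ih => simp [ih]

-- exchanging the two flatMaps is a permutation (via multisets)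
theorem fmc_flatMap_comm {α β γ : Type} (l₁ : List α) (l₂ : List β) (f : α → β → List γ) :
    (l₁.flatMap (fun a => l₂.flatMap (fun b => f a b))).Perm
      (l₂.flatMap (fun b => l₁.flatMap (fun a => f a b))) := by
  rw [← Multiset.coe_eq_coe]
  simp only [← Multiset.coe_bind]
  exact Multiset.bind_bind (l₁ : Multiset α) (l₂ : Multiset β)

-- ===== VERDICT (by name: the statement is the Claim_ definition above) =====
theorem find_matching_columns_spec : Claim_equal_find_matching_columns := by
  intro row vtm _
  unfold Spec_find_matching_columns find_matching_columns find_matching_columns_alt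
  simp only [fmc_a_list, fmc_b_list, List.nil_append]
  congr 1
  apply PySem.List.sorted_eq_sorted_of_perm _ _ _ (fun _ _ h => h)
  have h := fmc_flatMap_comm row vtm (fun p v => if p.2 = v then [p.1] else [])
  refine h.trans (List.Perm.of_eq ?_)
  exact List.flatMap_congr (fun v _ => (fmc_index_getD row v).symm)
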